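-- pv_equiv track=rewrite | github.com/signalwire/latency_checker | detection/silence.py | _group_frames
-- ===== SOURCE A (Python) =====
-- from typing import List, Tuple, Optional
--
-- def _group_frames(frame_is_silence: List[bool]) -> List[Tuple[int, int, bool]]:
--     """
--     Group consecutive frames with same silence status.
--
--     Args:
--         frame_is_silence: List of boolean values indicating if each frame is silence
--
--     Returns:
--         List of (start_frame, end_frame, is_silence) tuples
--     """
--     if not frame_is_silence:
--         return []
--
--     groups = []
--     current_is_silence = frame_is_silence[0]
--     start_frame = 0
--
--     for i in range(1, len(frame_is_silence)):
--         if frame_is_silence[i] != current_is_silence: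
--             groups.append((start_frame, i, current_is_silence))
--             current_is_silence = frame_is_silence[i]
--             start_frame = i
--
--     groups.append((start_frame, len(frame_is_silence), current_is_silence))
--
--     return groups
-- ===== SOURCE B (Python) =====
-- from typing import List, Tuple
--
-- def _group_frames(frame_is_silence: List[bool]) -> List[Tuple[int, int, bool]]:
--     if not frame_is_silence:
--         return []
--     n = len(frame_is_silence)
--     # pass 1: boundary indices where the value changes; pass 2: zip consecutive edges
--     edges = [0] + [i for i in range(1, n)
--                    if frame_is_silence[i] != frame_is_silence[i - 1]] + [n]
--     return [(s, e, frame_is_silence[s]) for s, e in zip(edges, edges[1:])]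
-- ===== Notes on version B (the rewrite author's own statement) =====
-- stated objective: alternative
-- what changed: Replaces the single stateful loop carrying (groups, current value, start index) with a stateless two-pass decomposition: first collect the boundary indices where consecutive values differ, then zip consecutive boundaries into (start, end, value) tuples.
import Mathlib
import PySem

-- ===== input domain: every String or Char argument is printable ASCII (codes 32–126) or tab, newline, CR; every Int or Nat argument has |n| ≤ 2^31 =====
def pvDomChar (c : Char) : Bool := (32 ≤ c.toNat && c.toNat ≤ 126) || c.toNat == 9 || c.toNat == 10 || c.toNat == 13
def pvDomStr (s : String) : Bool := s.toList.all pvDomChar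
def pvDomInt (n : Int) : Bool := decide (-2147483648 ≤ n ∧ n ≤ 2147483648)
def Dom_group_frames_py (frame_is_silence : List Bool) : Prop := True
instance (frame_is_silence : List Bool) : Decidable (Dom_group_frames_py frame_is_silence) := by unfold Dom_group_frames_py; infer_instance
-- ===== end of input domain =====

-- B is an alternative decomposition of the same O(n) task: two stateless passes (boundary
-- indices, then zip of consecutive edges) instead of A's single loop carrying mutable state.

-- ===== PORT A =====
-- one loop step of A's for-loop: state = (groups, current_is_silence, start_frame)
def pvStepA (l : List Bool) (st : List (Int × Int × Bool) × Bool × Int) (i : Int) :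
    List (Int × Int × Bool) × Bool × Int :=
  -- frame_is_silence[i]; i is always in range here, so pyGetD with any default is exact
  if PySem.List.pyGetD l i false ≠ st.2.1 then
    (st.1 ++ [(st.2.2, i, st.2.1)], PySem.List.pyGetD l i false, i)
  else st

def group_frames_py (frame_is_silence : List Bool) : List (Int × Int × Bool) :=
  match frame_is_silence with
  | [] => []
  | x :: _ =>
    let st := (PySem.List.pyRange 1 (frame_is_silence.length : Int) 1).foldl
        (pvStepA frame_is_silence) ([], x, 0)
    st.1 ++ [(st.2.2, (frame_is_silence.length : Int), st.2.1)]

-- ===== PORT B =====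
-- pass 1 predicate: a boundary at i, i.e. frame_is_silence[i] != frame_is_silence[i-1]
def pvCutB (l : List Bool) (i : Int) : Bool :=
  PySem.List.pyGetD l i false != PySem.List.pyGetD l (i - 1) false

-- pass 2: [(s, e, frame_is_silence[s]) for s, e in zip(edges, edges[1:])]
def pvZipB (l : List Bool) (edges : List Int) : List (Int × Int × Bool) :=
  (edges.zip edges.tail).map (fun p => (p.1, p.2, PySem.List.pyGetD l p.1 false))

def group_frames_py_alt (frame_is_silence : List Bool) : List (Int × Int × Bool) :=
  if frame_is_silence = [] then []
  else
    let n : Int := frame_is_silence.length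
    let edges : List Int :=
      0 :: (PySem.List.pyRange 1 n 1).filter (pvCutB frame_is_silence) ++ [n]
    pvZipB frame_is_silence edges

-- ===== PRECONDITION & SPEC =====
def Spec_group_frames_py (frame_is_silence : List Bool) (out : List (Int × Int × Bool)) : Prop := out = group_frames_py_alt frame_is_silence
instance (frame_is_silence : List Bool) (out : List (Int × Int × Bool)) : Decidable (Spec_group_frames_py frame_is_silence out) := by unfold Spec_group_frames_py; infer_instance

-- ===== CLAIM (what is proved, stated in full; the proofs are below) =====
def Claim_equal_group_frames_py : Prop := ∀ (frame_is_silence : List Bool), Dom_group_frames_py frame_is_silence → Spec_group_frames_py frame_is_silence (group_frames_py frame_is_silence)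

-- ===== LEMMAS AND PROOFS =====

lemma pvZipB_cons (l : List Bool) (a b : Int) (t : List Int) :
    pvZipB l (a :: b :: t) = (a, b, PySem.List.pyGetD l a false) :: pvZipB l (b :: t) := rfl

-- loop invariant: A's remaining fold (plus the final append) equals B's zip of the
-- remaining boundaries, provided the value is constant c on [s, k).
lemma pvLoop (l : List Bool) :
    ∀ (m : Nat) (k s : Int) (c : Bool) (g : List (Int × Int × Bool)),
      (((l.length : Int)) - k).toNat ≤ m → 0 ≤ s → s < k →
      (∀ j : Int, s ≤ j → j < k → PySem.List.pyGetD l j false = c) →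
      (let st := (PySem.List.pyRange k (l.length : Int) 1).foldl (pvStepA l) (g, c, s)
       st.1 ++ [(st.2.2, (l.length : Int), st.2.1)])
      = g ++ pvZipB l (s :: (PySem.List.pyRange k (l.length : Int) 1).filter (pvCutB l) ++ [(l.length : Int)]) := by
  intro m
  induction m with
  | zero =>
    intro k s c g hm hs hsk hc
    have hk : (l.length : Int) ≤ k := by omega
    rw [PySem.List.pyRange_one_eq_nil hk]
    simp [pvZipB, hc s le_rfl hsk]
  | succ m ih =>
    intro k s c g hm hs hsk hc
    by_cases hk : (l.length : Int) ≤ k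
    · rw [PySem.List.pyRange_one_eq_nil hk]
      simp [pvZipB, hc s le_rfl hsk]
    · push_neg at hk
      rw [PySem.List.pyRange_one_cons hk]
      have hprev : PySem.List.pyGetD l (k - 1) false = c := hc (k - 1) (by omega) (by omega)
      by_cases hv : PySem.List.pyGetD l k false = c
      · have hstep : pvStepA l (g, c, s) k = (g, c, s) := by simp [pvStepA, hv]
        have hcut : pvCutB l k = false := by simp [pvCutB, hv, hprev]
        rw [List.foldl_cons, hstep, List.filter_cons, hcut]
        simp only [Bool.false_eq_true, if_false]
        exact ih (k + 1) s c g (by omega) hs (by omega)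
          (fun j hj1 hj2 => by
            rcases lt_or_eq_of_le (Int.lt_add_one_iff.mp hj2) with h | h
            · exact hc j hj1 h
            · subst h; exact hv)
      · have hstep : pvStepA l (g, c, s) k =
            (g ++ [(s, k, c)], PySem.List.pyGetD l k false, k) := by simp [pvStepA, hv]
        have hcut : pvCutB l k = true := by simp [pvCutB, hprev]; exact hv
        rw [List.foldl_cons, hstep, List.filter_cons, hcut]
        simp only [if_true]
        have := ih (k + 1) k (PySem.List.pyGetD l k false) (g ++ [(s, k, c)]) (by omega)
          (by omega) (by omega)
          (fun j hj1 hj2 => by rw [show j = k from by omega])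
        rw [this]
        simp only [List.cons_append]
        rw [pvZipB_cons l s k, hc s le_rfl hsk]
        simp
theorem pv_main (l : List Bool) : group_frames_py l = group_frames_py_alt l := by
  match l with
  | [] => rfl
  | x :: xs =>
    have hne : (x :: xs : List Bool) ≠ [] := by simp
    unfold group_frames_py group_frames_py_alt
    simp only [hne, if_false]
    exact pvLoop (x :: xs) (x :: xs).length 1 0 x []
      (by omega) (by omega) (by omega)
      (fun j hj1 hj2 => by
        rw [show j = 0 from by omega]
        simp [PySem.List.pyGetD, PySem.List.pyGet?, PySem.List.pyIdx?])

-- ===== VERDICT (by name: the statement is the Claim_ definition above) =====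
theorem group_frames_py_spec : Claim_equal_group_frames_py := by
  intro l _
  unfold Spec_group_frames_py
  exact pv_main l
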